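-- pv_equiv track=rewrite | github.com/edgarz0102/PythonBasico | Semana 3/lunes/100num.py | esparimpar
-- ===== SOURCE A (Python) =====
-- def esparimpar(fin):
--     rango=range(1, fin+1)
--     pares=[]
--     impares=[]
--     for i in rango:
--         if i%2==0:
--             pares.append(i)
--         else:
--             impares.append(i)
--     return pares, impares
-- ===== SOURCE B (Python) =====
-- def esparimpar(fin):
--     return list(range(2, fin + 1, 2)), list(range(1, fin + 1, 2))
-- ===== Notes on version B (the rewrite author's own statement) =====
-- stated objective: simpler
-- what changed: Replaces the loop over 1..fin testing each number's parity by two direct strided range constructions (step 2), so no element-wise parity test or accumulator lists are needed.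
import Mathlib
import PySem

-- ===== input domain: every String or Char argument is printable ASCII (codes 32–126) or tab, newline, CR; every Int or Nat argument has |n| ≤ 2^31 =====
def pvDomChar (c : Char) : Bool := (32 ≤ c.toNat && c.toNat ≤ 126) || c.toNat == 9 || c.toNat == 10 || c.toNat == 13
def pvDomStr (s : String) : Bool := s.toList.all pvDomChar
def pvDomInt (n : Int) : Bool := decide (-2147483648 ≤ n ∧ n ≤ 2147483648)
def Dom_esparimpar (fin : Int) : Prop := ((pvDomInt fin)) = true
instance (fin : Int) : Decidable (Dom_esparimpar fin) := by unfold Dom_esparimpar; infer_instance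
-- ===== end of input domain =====

-- B replaces the parity-testing loop by two direct strided range constructions (simpler, no per-element test).

-- ===== PORT A =====
def esparimpar (fin : Int) : List Int × List Int :=
  let rango := PySem.List.pyRange 1 (fin + 1) 1
  rango.foldl
    (fun (acc : List Int × List Int) i =>
      if PySem.Int.mod i 2 == 0 then (acc.1 ++ [i], acc.2) else (acc.1, acc.2 ++ [i]))
    ([], [])

-- ===== PORT B =====
def esparimpar_alt (fin : Int) : List Int × List Int :=
  (PySem.List.pyRange 2 (fin + 1) 2, PySem.List.pyRange 1 (fin + 1) 2)

-- ===== PRECONDITION & SPEC =====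
def Spec_esparimpar (fin : Int) (out : List Int × List Int) : Prop := out = esparimpar_alt fin
instance (fin : Int) (out : List Int × List Int) : Decidable (Spec_esparimpar fin out) := by unfold Spec_esparimpar; infer_instance

-- ===== CLAIM (what is proved, stated in full; the proofs are below) =====
def Claim_equal_esparimpar : Prop := ∀ (fin : Int), Dom_esparimpar fin → Spec_esparimpar fin (esparimpar fin)

-- ===== LEMMAS AND PROOFS =====

lemma pvRange2_evens (n : Nat) :
    PySem.List.pyRange 2 ((n : Int) + 1) 2 =
      (List.range (n / 2)).map (fun k : Nat => (2 : Int) + 2 * (k : Int)) := by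
  rw [PySem.List.pyRange_of_pos _ _ (by norm_num)]
  have hc : (if (2:Int) < (n:Int) + 1 then (((n:Int) + 1 - 2 + 2 - 1) / 2).toNat else 0) = n / 2 := by
    split_ifs with h <;> omega
  rw [hc]

lemma pvRange2_odds (n : Nat) :
    PySem.List.pyRange 1 ((n : Int) + 1) 2 =
      (List.range ((n + 1) / 2)).map (fun k : Nat => (1 : Int) + 2 * (k : Int)) := by
  rw [PySem.List.pyRange_of_pos _ _ (by norm_num)]
  have hc : (if (1:Int) < (n:Int) + 1 then (((n:Int) + 1 - 1 + 2 - 1) / 2).toNat else 0) = (n + 1) / 2 := by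
    split_ifs with h <;> omega
  rw [hc]

lemma pvLoop (n : Nat) :
    ((List.range n).map (fun k : Nat => (1 : Int) + (k : Int))).foldl
      (fun (acc : List Int × List Int) i =>
        if PySem.Int.mod i 2 == 0 then (acc.1 ++ [i], acc.2) else (acc.1, acc.2 ++ [i]))
      ([], []) =
    ((List.range (n / 2)).map (fun k : Nat => (2 : Int) + 2 * (k : Int)),
     (List.range ((n + 1) / 2)).map (fun k : Nat => (1 : Int) + 2 * (k : Int))) := by
  induction n with
  | zero => simp
  | succ n ih =>
    rw [List.range_succ, List.map_append, List.foldl_append, ih]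
    simp only [List.map_cons, List.map_nil, List.foldl_cons, List.foldl_nil]
    by_cases hpar : n % 2 = 1
    · -- 1 + n is even: appended to pares
      have hmod : PySem.Int.mod ((1 : Int) + n) 2 = 0 := by
        unfold PySem.Int.mod
        rw [Int.fmod_eq_emod, if_pos (Or.inl (by norm_num))]
        omega
      rw [hmod]
      simp only [beq_self_eq_true, if_true]
      have h1 : (n + 1) / 2 = n / 2 + 1 := by omega
      have h2 : (n + 1 + 1) / 2 = (n + 1) / 2 := by omega
      have h3 : (2 : Int) + 2 * ((n / 2 : Nat) : Int) = 1 + n := by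
        have : 2 * (n / 2) + 1 = n := by omega
        push_cast
        omega
      rw [h2, h1]
      simp only [List.range_succ, List.map_append, List.map_cons, List.map_nil]
      rw [h3]
    · -- 1 + n is odd: appended to impares
      have hn : n % 2 = 0 := by omega
      have hmod : PySem.Int.mod ((1 : Int) + n) 2 = 1 := by
        unfold PySem.Int.mod
        rw [Int.fmod_eq_emod, if_pos (Or.inl (by norm_num))]
        omega
      rw [hmod]
      simp only [show ((1 : Int) == 0) = false by decide, Bool.false_eq_true, if_false]
      have h1 : (n + 1) / 2 = n / 2 := by omega
      have h2 : (n + 1 + 1) / 2 = (n + 1) / 2 + 1 := by omega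
      have h3 : (1 : Int) + 2 * ((n / 2 : Nat) : Int) = 1 + n := by
        have : 2 * (n / 2) = n := by omega
        push_cast
        omega
      rw [h2, h1]
      simp only [List.range_succ, List.map_append, List.map_cons, List.map_nil]
      rw [h3]

-- ===== VERDICT (by name: the statement is the Claim_ definition above) =====
theorem esparimpar_spec : Claim_equal_esparimpar := by
  intro fin _
  unfold Spec_esparimpar esparimpar esparimpar_alt
  rcases (show fin ≤ 0 ∨ 0 < fin by omega) with hf | hf
  · rw [PySem.List.pyRange_one_eq_nil (by omega)]
    rw [PySem.List.pyRange_of_pos _ _ (show (0:Int) < 2 by norm_num),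
        PySem.List.pyRange_of_pos _ _ (show (0:Int) < 2 by norm_num)]
    simp only [if_neg (show ¬((2:Int) < fin + 1) by omega),
               if_neg (show ¬((1:Int) < fin + 1) by omega)]
    simp
  · obtain ⟨n, rfl⟩ : ∃ n : Nat, fin = (n : Int) := ⟨fin.toNat, by omega⟩
    rw [PySem.List.pyRange_one, show ((n : Int) + 1 - 1) = (n : Int) by ring,
        Int.toNat_natCast, pvRange2_evens, pvRange2_odds]
    exact pvLoop n
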